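-- pv_equiv track=rewrite | github.com/pypi-data/pypi-mirror-105 | packages/formeval/formeval-1.0.4.tar.gz/formeval-1.0.4/src/formeval/cider.py | get_ngram_counts
-- ===== SOURCE A (Python) =====
-- import collections
--
-- def ngram_counts(tokens, n):
--     if n == 1:
--         return collections.Counter(tokens)
--     return collections.Counter(' '.join(tokens[i: i + n]) for i in range(len(tokens) - n + 1)) \
--         if len(tokens) >= n else {}
--
-- def get_ngram_counts(data, n):
--     res = [collections.defaultdict(list) for _ in range(n)]
--     for key, values in data.items():
--         for tokens in values:
--             for i in range(1, n):
--                 count = ngram_counts(tokens, i)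
--                 res[i][key].append(count)
--     return res
-- ===== SOURCE B (Python) =====
-- import collections
--
-- def get_ngram_counts(data, n):
--     def counts(tokens, L):
--         # order-L counter via a sliding window instead of slicing at every start index
--         if L == 1:
--             return collections.Counter(tokens)
--         if len(tokens) < L:
--             return {}
--         window = tokens[:L]
--         c = collections.Counter([' '.join(window)])
--         for t in tokens[L:]:
--             window = window[1:] + [t]
--             c[' '.join(window)] += 1
--         return c
--
--     res = [collections.defaultdict(list) for _ in range(n)]
--     for L in range(1, n):          # orders outer, data inner (transposed traversal)
--         for key, values in data.items():
--             if values: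
--                 res[L][key] = [counts(tokens, L) for tokens in values]
--     return res
-- ===== Notes on version B (the rewrite author's own statement) =====
-- stated objective: alternative
-- what changed: B transposes the traversal (orders outer, data inner, one assignment per key instead of per-(key,tokens,order) appends into preallocated defaultdicts) and computes each order's counter with a sliding window updated incrementally instead of A's fresh slice-and-join pass per start index.
import Mathlib
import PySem

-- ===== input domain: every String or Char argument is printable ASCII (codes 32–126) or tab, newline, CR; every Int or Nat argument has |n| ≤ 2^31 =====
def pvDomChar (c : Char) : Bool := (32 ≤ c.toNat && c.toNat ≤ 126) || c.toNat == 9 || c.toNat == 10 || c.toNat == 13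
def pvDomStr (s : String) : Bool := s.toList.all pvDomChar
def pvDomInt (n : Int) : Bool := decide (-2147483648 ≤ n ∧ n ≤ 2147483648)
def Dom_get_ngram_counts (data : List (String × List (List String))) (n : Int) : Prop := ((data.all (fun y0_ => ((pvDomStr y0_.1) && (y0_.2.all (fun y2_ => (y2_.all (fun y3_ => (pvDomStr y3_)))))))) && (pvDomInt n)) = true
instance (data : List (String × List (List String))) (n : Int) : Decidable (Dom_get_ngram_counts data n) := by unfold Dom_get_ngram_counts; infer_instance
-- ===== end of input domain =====

-- B computes each order's counter with a sliding window and an incrementally updated Counter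
-- instead of A's fresh slice-and-join pass per start index, and fills the result order-by-order
-- (orders outer, data inner, one assignment per key) instead of A's per-(key,tokens,order) appends.

-- ===== PORT A =====
-- ngram_counts(tokens, n)
def pvNgramCounts (tokens : List String) (n : Int) : PySem.Dict String Int :=
  if n == 1 then PySem.Dict.counter tokens
  else if n ≤ (tokens.length : Int) then
    PySem.Dict.counter ((PySem.List.pyRange 0 ((tokens.length : Int) - n + 1)).map
      (fun i => PySem.Str.join " " (PySem.List.slice tokens (some i) (some (i + n)))))
  else PySem.Dict.mk []   -- the plain `{}` branch

def get_ngram_counts (data : List (String × List (List String))) (n : Int) : List (List (String × List (List (String × Int)))) :=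
  let res0 : List (PySem.Dict String (List (PySem.Dict String Int))) :=
    (List.range n.toNat).map (fun _ => PySem.Dict.empty)     -- [defaultdict(list) for _ in range(n)]
  let res := data.foldl (fun res kv =>
    kv.2.foldl (fun res tokens =>
      (PySem.List.pyRange 1 n).foldl (fun res i =>
        res.set i.toNat
          ((res.getD i.toNat PySem.Dict.empty).modify kv.1 [] (fun l => l ++ [pvNgramCounts tokens i])))
        res) res) res0
  -- the returned dicts rendered as association lists (type convention)
  res.map (fun d => d.items.map (fun p => (p.1, p.2.map PySem.Dict.items)))

-- ===== PORT B =====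
-- counts(tokens, L) from Source B: sliding-window grams, Counter updated incrementally
def pvCountsAlt (tokens : List String) (L : Int) : PySem.Dict String Int :=
  if L == 1 then PySem.Dict.counter tokens
  else if (tokens.length : Int) < L then PySem.Dict.mk []    -- the plain `{}` branch
  else
    let window := PySem.List.slice tokens none (some L)
    let st := (PySem.List.slice tokens (some L) none).foldl
      (fun (st : PySem.Dict String Int × List String) t =>
        let w := PySem.List.slice st.2 (some 1) none ++ [t]
        (st.1.modify (PySem.Str.join " " w) 0 (· + 1), w))
      (PySem.Dict.counter [PySem.Str.join " " window], window)
    st.1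

def get_ngram_counts_alt (data : List (String × List (List String))) (n : Int) : List (List (String × List (List (String × Int)))) :=
  let res0 : List (PySem.Dict String (List (PySem.Dict String Int))) :=
    (List.range n.toNat).map (fun _ => PySem.Dict.empty)     -- [defaultdict(list) for _ in range(n)]
  let res := (PySem.List.pyRange 1 n).foldl (fun res L =>
    data.foldl (fun res kv =>
      if kv.2.isEmpty = true then res
      else res.set L.toNat
        ((res.getD L.toNat PySem.Dict.empty).insert kv.1 (kv.2.map (fun tokens => pvCountsAlt tokens L))))
      res) res0
  -- the returned dicts rendered as association lists (type convention)
  res.map (fun d => d.items.map (fun p => (p.1, p.2.map PySem.Dict.items)))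

-- ===== PRECONDITION & SPEC =====
-- Pre_ excludes association lists with duplicate keys: A's `data` is a Python dict, whose keys are
-- necessarily distinct, so such lists represent no Python input.
def Pre_get_ngram_counts (data : List (String × List (List String))) (n : Int) : Prop :=
  (data.map Prod.fst).Nodup
instance (data : List (String × List (List String))) (n : Int) : Decidable (Pre_get_ngram_counts data n) := by unfold Pre_get_ngram_counts; infer_instance

def pvWitness_get_ngram_counts : (List (String × List (List String))) × Int :=
  ([("a", [["x", "x", "y"]]), ("b", [])], 3)

def Spec_get_ngram_counts (data : List (String × List (List String))) (n : Int) (out : List (List (String × List (List (String × Int))))) : Prop := out = get_ngram_counts_alt data n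
instance (data : List (String × List (List String))) (n : Int) (out : List (List (String × List (List (String × Int))))) : Decidable (Spec_get_ngram_counts data n out) := by unfold Spec_get_ngram_counts; infer_instance

-- ===== CLAIM (what is proved, stated in full; the proofs are below) =====
def Claim_equal_get_ngram_counts : Prop := ∀ (data : List (String × List (List String))) (n : Int), Dom_get_ngram_counts data n → Pre_get_ngram_counts data n → Spec_get_ngram_counts data n (get_ngram_counts data n)

-- ===== LEMMAS AND PROOFS =====

-- sliding window over the suffix reproduces the per-start-index counter updates
theorem pv_slide (L : Nat) (toks : List String) :
    ∀ (m k : Nat) (c : PySem.Dict String Int), m = toks.length - L - k → k + L ≤ toks.length → 1 ≤ L →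
    ((toks.drop (k + L)).foldl
      (fun (st : PySem.Dict String Int × List String) t =>
        (st.1.modify (PySem.Str.join " " (st.2.drop 1 ++ [t])) 0 (· + 1), st.2.drop 1 ++ [t]))
      (c, (toks.drop k).take L)).1
    = ((List.range' (k + 1) (toks.length - L - k)).map
        (fun j => PySem.Str.join " " ((toks.drop j).take L))).foldl
        (fun c g => c.modify g 0 (· + 1)) c := by
  intro m
  induction m with
  | zero =>
    intro k c hm hk hL
    rw [← hm]
    have hd : toks.drop (k + L) = [] := by
      apply List.drop_eq_nil_of_le; omega
    rw [hd]
    simp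
  | succ m ih =>
    intro k c hm hk hL
    have hlt : k + L < toks.length := by omega
    have hd : toks.drop (k + L) = toks[k + L] :: toks.drop (k + L + 1) := List.drop_eq_getElem_cons hlt
    have hw : ((toks.drop k).take L).drop 1 ++ [toks[k + L]] = (toks.drop (k + 1)).take L := by
      rw [List.drop_take, List.drop_drop]
      conv_rhs => rw [show L = (L - 1) + 1 by omega, List.take_add_one]
      have hg : (toks.drop (k + 1))[L - 1]? = some toks[k + L] := by
        have hidx : k + 1 + (L - 1) = k + L := by omega
        rw [List.getElem?_drop, hidx, List.getElem?_eq_getElem hlt]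
      rw [hg]
      simp
    rw [hd, List.foldl_cons]
    simp only [hw]
    have hstep := ih (k + 1) (c.modify (PySem.Str.join " " ((toks.drop (k + 1)).take L)) 0 (· + 1))
      (by omega) (by omega) hL
    have hkL : k + 1 + L = k + L + 1 := by omega
    rw [hkL] at hstep
    rw [hstep, ← hm]
    rw [show m + 1 = (toks.length - L - (k + 1)) + 1 by omega]
    rw [List.range'_succ, List.map_cons, List.foldl_cons]

-- the two per-order counters agree
theorem pv_counts_eq (tokens : List String) (i : Int) (hi : 1 ≤ i) :
    pvNgramCounts tokens i = pvCountsAlt tokens i := by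
  by_cases h1 : i = 1
  · subst h1
    simp [pvNgramCounts, pvCountsAlt]
  · have hbeq : (i == 1) = false := by simp [h1]
    by_cases hlen : i ≤ (tokens.length : Int)
    · -- main case: 2 ≤ i ≤ len
      have hi2 : 2 ≤ i := by omega
      set N := tokens.length with hN
      set L := i.toNat with hL
      have hiL : i = (L : Int) := by omega
      have hLN : L ≤ N := by omega
      have hL1 : 1 ≤ L := by omega
      -- A side
      have hA : pvNgramCounts tokens i
          = PySem.Dict.counter ((List.range (N - L + 1)).map
              (fun k => PySem.Str.join " " ((tokens.drop k).take L))) := by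
        rw [pvNgramCounts]
        rw [if_neg (by simp [h1]), if_pos hlen]
        congr 1
        have hb : (N : Int) - i + 1 = ((N - L + 1 : Nat) : Int) := by omega
        rw [hb, PySem.List.pyRange_zero_natCast, List.map_map]
        apply List.map_congr_left
        intro k hk
        simp only [Function.comp]
        have : (k : Int) + i = ((k + L : Nat) : Int) := by omega
        rw [this, PySem.List.slice_natCast]
        congr 2
        omega
      -- B side
      have hnotlt : ¬ ((tokens.length : Int) < i) := by omega
      rw [hA, pvCountsAlt]
      simp only [hbeq, Bool.false_eq_true, if_false, if_neg hnotlt]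
      rw [PySem.List.slice_to tokens (by omega), PySem.List.slice_from tokens (by omega)]
      have htn : i.toNat = L := rfl
      rw [htn]
      have hfun : (fun (st : PySem.Dict String Int × List String) t =>
          ((st.1.modify (PySem.Str.join " " (PySem.List.slice st.2 (some 1) none ++ [t])) 0 (· + 1),
            PySem.List.slice st.2 (some 1) none ++ [t])))
          = (fun (st : PySem.Dict String Int × List String) t =>
            (st.1.modify (PySem.Str.join " " (st.2.drop 1 ++ [t])) 0 (· + 1), st.2.drop 1 ++ [t])) := by
        funext st t
        rw [PySem.List.slice_from st.2 (by omega)]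
        norm_num
      rw [hfun]
      have hs := pv_slide L tokens (N - L) 0 (PySem.Dict.counter [PySem.Str.join " " (tokens.take L)])
        (by omega) (by omega) hL1
      simp only [Nat.zero_add, List.drop_zero, Nat.sub_zero] at hs
      rw [hs]
      rw [show N - L + 1 = (N - L) + 1 from rfl, List.range_eq_range']
      rw [List.range'_succ, List.map_cons]
      rw [PySem.Dict.counter_eq_foldl, List.foldl_cons]
      rfl
    · -- too short: both are the empty dict
      rw [pvNgramCounts, pvCountsAlt]
      simp only [hbeq, Bool.false_eq_true, if_false, if_neg hlen,
        if_pos (show (tokens.length : Int) < i by omega)]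

theorem pv_foldl_set_getElem? {α : Type} (d0 : α) (g : Int → α → α) :
    ∀ (is : List Int), is.Nodup → ∀ (res : List α),
      (∀ i ∈ is, 0 ≤ i ∧ i.toNat < res.length) → ∀ (j : Nat),
      (is.foldl (fun r i => r.set i.toNat (g i (r.getD i.toNat d0))) res)[j]?
        = if (j : Int) ∈ is then some (g j (res.getD j d0)) else res[j]? := by
  intro is
  induction is with
  | nil => intro _ res _ j; simp
  | cons i tl ih =>
    intro hnd res hb j
    have hnd' := hnd.of_cons
    have hi := hb i (List.mem_cons_self ..)
    have hb' : ∀ x ∈ tl, 0 ≤ x ∧ x.toNat < (res.set i.toNat (g i (res.getD i.toNat d0))).length := by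
      intro x hx
      have := hb x (List.mem_cons_of_mem _ hx)
      simpa using this
    rw [List.foldl_cons, ih hnd' _ hb' j]
    by_cases hjt : (j : Int) ∈ tl
    · rw [if_pos hjt, if_pos (List.mem_cons_of_mem _ hjt)]
      have hne : i.toNat ≠ j := by
        intro h
        have : i = (j : Int) := by omega
        exact (List.nodup_cons.mp hnd).1 (this ▸ hjt)
      rw [List.getD_eq_getElem?_getD, List.getElem?_set_ne hne, ← List.getD_eq_getElem?_getD]
    · rw [if_neg hjt]
      by_cases hji : (j : Int) = i
      · have hji' : i.toNat = j := by omega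
        rw [if_pos (by simp [hji])]
        rw [List.getElem?_set]
        rw [if_pos hji', if_pos (hji' ▸ hi.2)]
        rw [hji', hji]
      · have hne : i.toNat ≠ j := by omega
        rw [if_neg (by simp [hji, hjt]), List.getElem?_set_ne hne]

-- G1
theorem pv_get?_last {ν : Type} (key : String) (v : ν) :
    ∀ (itms : List (String × ν)), (∀ p ∈ itms, (p.1 == key) = false) →
      (PySem.Dict.mk (itms ++ [(key, v)])).get? key = some v := by
  intro itms
  induction itms with
  | nil => intro _; simp [PySem.Dict.get?]
  | cons p tl ih =>
    intro h
    rw [List.cons_append, PySem.Dict.get?_mk_cons]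
    rw [if_neg (by simp [h p (List.mem_cons_self ..)])]
    exact ih (fun q hq => h q (List.mem_cons_of_mem _ hq))

-- G2
theorem pv_modify_last {ν : Type} (key : String) (v : ν) (d0 : ν) (f : ν → ν)
    (itms : List (String × ν)) (h : ∀ p ∈ itms, (p.1 == key) = false) :
    (PySem.Dict.mk (itms ++ [(key, v)])).modify key d0 f
      = PySem.Dict.mk (itms ++ [(key, f v)]) := by
  have hget := pv_get?_last key v itms h
  have hcont : (PySem.Dict.mk (itms ++ [(key, v)])).contains key = true := by
    rw [PySem.Dict.contains_eq_isSome_get?, hget]; rfl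
  have hgetD : (PySem.Dict.mk (itms ++ [(key, v)])).getD key d0 = v := by
    rw [PySem.Dict.getD_eq_get?_getD, hget]; rfl
  rw [PySem.Dict.modify, hgetD]
  apply PySem.Dict.ext
  rw [PySem.Dict.items_insert_of_contains _ _ hcont]
  show (itms ++ [(key, v)]).map _ = _
  rw [List.map_append]
  congr 1
  · have hm : List.map (fun p => if (p.1 == key) = true then (key, f v) else p) itms
        = List.map id itms := List.map_congr_left (fun p hp => by simp [h p hp])
    rw [hm, List.map_id]
  · simp

-- G3
theorem pv_fold_modify_last {ν : Type} (c : List String → ν) (key : String) :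
    ∀ (l : List (List String)) (itms : List (String × List ν)) (v : List ν),
      (∀ p ∈ itms, (p.1 == key) = false) →
      (l.foldl (fun d t => d.modify key [] (fun s => s ++ [c t]))
        (PySem.Dict.mk (itms ++ [(key, v)]))).items = itms ++ [(key, v ++ l.map c)] := by
  intro l
  induction l with
  | nil => intro itms v h; simp
  | cons t tl ih =>
    intro itms v h
    rw [List.foldl_cons, pv_modify_last key v [] _ itms h, ih itms _ h]
    simp

-- G4
theorem pv_fold_modify_fresh {ν : Type} (c : List String → ν) (key : String)
    (l : List (List String)) (itms : List (String × List ν))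
    (h : ∀ p ∈ itms, (p.1 == key) = false) :
    (l.foldl (fun d t => d.modify key [] (fun s => s ++ [c t]))
      (PySem.Dict.mk itms)).items
      = if l.isEmpty then itms else itms ++ [(key, l.map c)] := by
  cases l with
  | nil => simp
  | cons t tl =>
    rw [List.foldl_cons]
    have hcont : (PySem.Dict.mk itms).contains key = false := by
      rw [PySem.Dict.contains_mk]
      simp only [List.any_eq_false]
      intro p hp; simp [h p hp]
    have h1 : (PySem.Dict.mk itms).modify key [] (fun s => s ++ [c t])
        = PySem.Dict.mk (itms ++ [(key, [c t])]) := by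
      rw [PySem.Dict.modify, PySem.Dict.getD_of_not_contains _ _ hcont]
      apply PySem.Dict.ext
      rw [PySem.Dict.items_insert_of_not_contains _ _ hcont]
      simp
    rw [h1, pv_fold_modify_last c key tl itms _ h]
    simp

-- G5
theorem pv_group {ν : Type} (c : List String → ν) :
    ∀ (data : List (String × List (List String))) (itms : List (String × List ν)),
      (itms.map Prod.fst ++ data.map Prod.fst).Nodup →
      (data.foldl (fun d kv => kv.2.foldl (fun d t => d.modify kv.1 [] (fun s => s ++ [c t])) d)
        (PySem.Dict.mk itms)).items
      = itms ++ (data.filter (fun kv => !kv.2.isEmpty)).map (fun kv => (kv.1, kv.2.map c)) := by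
  intro data
  induction data with
  | nil => intro itms _; simp
  | cons kv tl ih =>
    intro itms hnd
    rw [List.map_cons] at hnd
    have hnd2 : (itms.map Prod.fst ++ ([kv.1] ++ tl.map Prod.fst)).Nodup := hnd
    rw [← List.append_assoc] at hnd2
    have hfresh : ∀ p ∈ itms, (p.1 == kv.1) = false := by
      intro p hp
      have hdisj := (List.nodup_append.mp hnd).2.2
      have : p.1 ∈ itms.map Prod.fst := List.mem_map_of_mem hp
      have hne : p.1 ≠ kv.1 := hdisj _ this _ (List.mem_cons_self ..)
      simp [hne]
    rw [List.foldl_cons]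
    have h4 := pv_fold_modify_fresh c kv.1 kv.2 itms hfresh
    by_cases he : kv.2.isEmpty
    · rw [if_pos he] at h4
      have hd : (kv.2.foldl (fun d t => d.modify kv.1 [] (fun s => s ++ [c t])) (PySem.Dict.mk itms))
          = PySem.Dict.mk itms := PySem.Dict.ext h4
      rw [hd, ih itms ?hnd']
      · rw [List.filter_cons_of_neg (by simp [he])]
      case hnd' =>
        have h1 := List.nodup_append.mp hnd
        have h2 := List.nodup_cons.mp h1.2.1
        refine List.nodup_append.mpr ⟨h1.1, h2.2, ?_⟩
        intro a ha b hb
        exact h1.2.2 a ha b (List.mem_cons_of_mem _ hb)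
    · rw [if_neg he] at h4
      have hd : (kv.2.foldl (fun d t => d.modify kv.1 [] (fun s => s ++ [c t])) (PySem.Dict.mk itms))
          = PySem.Dict.mk (itms ++ [(kv.1, kv.2.map c)]) := PySem.Dict.ext h4
      rw [hd, ih _ ?hnd']
      · rw [List.filter_cons_of_pos (by simp [he])]
        simp
      case hnd' =>
        rw [List.map_append]
        rw [List.append_assoc]
        simpa using hnd2


theorem pv_foldl_set_length {α β : Type} (g : β → List α → α) (h : β → Nat) :
    ∀ (is : List β) (res : List α),
      (is.foldl (fun r i => r.set (h i) (g i r)) res).length = res.length := by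
  intro is
  induction is with
  | nil => intro res; rfl
  | cons i tl ih => intro res; simp [List.foldl_cons, ih]

-- the inner i-loop of port A, pointwise
theorem pv_iloop (n : Int) (key : String) (tokens : List String)
    (res : List (PySem.Dict String (List (PySem.Dict String Int)))) (hlen : res.length = n.toNat) (j : Nat) :
    ((PySem.List.pyRange 1 n).foldl (fun res i =>
        res.set i.toNat ((res.getD i.toNat PySem.Dict.empty).modify key []
          (fun l => l ++ [pvNgramCounts tokens i]))) res)[j]?
    = if 1 ≤ (j : Int) ∧ (j : Int) < n then
        some ((res.getD j PySem.Dict.empty).modify key [] (fun l => l ++ [pvNgramCounts tokens (j : Int)]))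
      else res[j]? := by
  have hh := pv_foldl_set_getElem? PySem.Dict.empty
    (fun i d => d.modify key [] (fun l => l ++ [pvNgramCounts tokens i]))
    (PySem.List.pyRange 1 n) (PySem.List.nodup_pyRange_one 1 n) res
    (fun i hi => by
      have hm := PySem.List.mem_pyRange_one.mp hi
      have hn : n ≤ (n.toNat : Int) := Int.self_le_toNat n
      exact ⟨by omega, by omega⟩) j
  simp only [] at hh
  rw [hh]
  by_cases hc : 1 ≤ (j : Int) ∧ (j : Int) < n
  · rw [if_pos (PySem.List.mem_pyRange_one.mpr hc), if_pos hc]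
  · rw [if_neg (fun hm => hc (PySem.List.mem_pyRange_one.mp hm)), if_neg hc]

-- the values loop, pointwise
theorem pv_vloop (n : Int) (key : String) (values : List (List String)) :
    ∀ (res : List (PySem.Dict String (List (PySem.Dict String Int)))), res.length = n.toNat → ∀ (j : Nat),
    (values.foldl (fun res tokens =>
        (PySem.List.pyRange 1 n).foldl (fun res i =>
          res.set i.toNat ((res.getD i.toNat PySem.Dict.empty).modify key []
            (fun l => l ++ [pvNgramCounts tokens i]))) res) res)[j]?
    = if 1 ≤ (j : Int) ∧ (j : Int) < n then
        some (values.foldl (fun d t => d.modify key [] (fun l => l ++ [pvNgramCounts t (j : Int)]))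
          (res.getD j PySem.Dict.empty))
      else res[j]? := by
  induction values with
  | nil =>
    intro res hlen j
    rw [List.foldl_nil, List.foldl_nil]
    by_cases hc : 1 ≤ (j : Int) ∧ (j : Int) < n
    · have hj : j < res.length := by
        have hn : n ≤ (n.toNat : Int) := Int.self_le_toNat n
        omega
      rw [if_pos hc, List.getD_eq_getElem?_getD, List.getElem?_eq_getElem hj]
      rfl
    · rw [if_neg hc]
  | cons t tl ih =>
    intro res hlen j
    rw [List.foldl_cons, List.foldl_cons]
    set res' := (PySem.List.pyRange 1 n).foldl (fun res i =>
        res.set i.toNat ((res.getD i.toNat PySem.Dict.empty).modify key []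
          (fun l => l ++ [pvNgramCounts t i]))) res with hres'
    have hlen' : res'.length = n.toNat := by
      rw [hres', pv_foldl_set_length (fun i r => ((r.getD i.toNat PySem.Dict.empty).modify key []
        (fun l => l ++ [pvNgramCounts t i]))) (fun i => i.toNat) (PySem.List.pyRange 1 n) res]
      exact hlen
    rw [ih res' hlen' j]
    by_cases hc : 1 ≤ (j : Int) ∧ (j : Int) < n
    · rw [if_pos hc, if_pos hc]
      have hgd : res'.getD j PySem.Dict.empty
          = (res.getD j PySem.Dict.empty).modify key [] (fun l => l ++ [pvNgramCounts t (j : Int)]) := by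
        rw [List.getD_eq_getElem?_getD, hres', pv_iloop n key t res hlen j, if_pos hc]
        rfl
      rw [hgd]
    · rw [if_neg hc, if_neg hc, hres', pv_iloop n key t res hlen j, if_neg hc]

theorem pv_vloop_len (n : Int) (key : String) (values : List (List String))
    (res : List (PySem.Dict String (List (PySem.Dict String Int)))) :
    (values.foldl (fun res tokens =>
        (PySem.List.pyRange 1 n).foldl (fun res i =>
          res.set i.toNat ((res.getD i.toNat PySem.Dict.empty).modify key []
            (fun l => l ++ [pvNgramCounts tokens i]))) res) res).length = res.length := by
  induction values generalizing res with
  | nil => rfl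
  | cons t tl ih =>
    rw [List.foldl_cons, ih]
    exact pv_foldl_set_length (fun i r => ((r.getD i.toNat PySem.Dict.empty).modify key []
      (fun l => l ++ [pvNgramCounts t i]))) (fun i => i.toNat) (PySem.List.pyRange 1 n) res

-- the data loop, pointwise
theorem pv_dloop (n : Int) (data : List (String × List (List String))) :
    ∀ (res : List (PySem.Dict String (List (PySem.Dict String Int)))), res.length = n.toNat → ∀ (j : Nat),
    (data.foldl (fun res kv =>
      kv.2.foldl (fun res tokens =>
        (PySem.List.pyRange 1 n).foldl (fun res i =>
          res.set i.toNat ((res.getD i.toNat PySem.Dict.empty).modify kv.1 []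
            (fun l => l ++ [pvNgramCounts tokens i]))) res) res) res)[j]?
    = if 1 ≤ (j : Int) ∧ (j : Int) < n then
        some (data.foldl (fun d kv => kv.2.foldl
            (fun d t => d.modify kv.1 [] (fun l => l ++ [pvNgramCounts t (j : Int)])) d)
          (res.getD j PySem.Dict.empty))
      else res[j]? := by
  induction data with
  | nil =>
    intro res hlen j
    rw [List.foldl_nil, List.foldl_nil]
    by_cases hc : 1 ≤ (j : Int) ∧ (j : Int) < n
    · have hj : j < res.length := by
        have hn : n ≤ (n.toNat : Int) := Int.self_le_toNat n
        omega
      rw [if_pos hc, List.getD_eq_getElem?_getD, List.getElem?_eq_getElem hj]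
      rfl
    · rw [if_neg hc]
  | cons kv tl ih =>
    intro res hlen j
    rw [List.foldl_cons, List.foldl_cons]
    set res' := kv.2.foldl (fun res tokens =>
        (PySem.List.pyRange 1 n).foldl (fun res i =>
          res.set i.toNat ((res.getD i.toNat PySem.Dict.empty).modify kv.1 []
            (fun l => l ++ [pvNgramCounts tokens i]))) res) res with hres'
    have hlen' : res'.length = n.toNat := by
      rw [hres', pv_vloop_len n kv.1 kv.2 res]; exact hlen
    rw [ih res' hlen' j]
    by_cases hc : 1 ≤ (j : Int) ∧ (j : Int) < n
    · rw [if_pos hc, if_pos hc]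
      have hgd : res'.getD j PySem.Dict.empty
          = kv.2.foldl (fun d t => d.modify kv.1 [] (fun l => l ++ [pvNgramCounts t (j : Int)]))
              (res.getD j PySem.Dict.empty) := by
        rw [List.getD_eq_getElem?_getD, hres', pv_vloop n kv.1 kv.2 res hlen j, if_pos hc]
        rfl
      rw [hgd]
    · rw [if_neg hc, if_neg hc, hres', pv_vloop n kv.1 kv.2 res hlen j, if_neg hc]

-- B's inner data loop at one order, pointwise
theorem pv_binner_ptwise (i : Int) (data : List (String × List (List String))) :
    ∀ (res : List (PySem.Dict String (List (PySem.Dict String Int)))) (j : Nat),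
    (data.foldl (fun res kv =>
        if kv.2.isEmpty = true then res
        else res.set i.toNat
          ((res.getD i.toNat PySem.Dict.empty).insert kv.1 (kv.2.map (fun tokens => pvCountsAlt tokens i))))
      res)[j]?
    = if j = i.toNat ∧ j < res.length then
        some (data.foldl (fun d kv =>
            if kv.2.isEmpty = true then d
            else d.insert kv.1 (kv.2.map (fun tokens => pvCountsAlt tokens i)))
          (res.getD i.toNat PySem.Dict.empty))
      else res[j]? := by
  induction data with
  | nil =>
    intro res j
    by_cases hc : j = i.toNat ∧ j < res.length
    · obtain ⟨hji, hjl⟩ := hc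
      rw [List.foldl_nil, List.foldl_nil, if_pos ⟨hji, hjl⟩,
        List.getElem?_eq_getElem hjl, List.getD_eq_getElem?_getD, ← hji,
        List.getElem?_eq_getElem hjl]
      rfl
    · rw [List.foldl_nil, List.foldl_nil, if_neg hc]
  | cons kv tl ih =>
    intro res j
    rw [List.foldl_cons, List.foldl_cons]
    by_cases he : kv.2.isEmpty = true
    · rw [if_pos he, if_pos he]
      exact ih res j
    · rw [if_neg he, if_neg he]
      set x0 := (res.getD i.toNat PySem.Dict.empty).insert kv.1 (kv.2.map (fun tokens => pvCountsAlt tokens i)) with hx0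
      rw [ih (res.set i.toNat x0) j]
      simp only [List.length_set]
      by_cases hc : j = i.toNat ∧ j < res.length
      · rw [if_pos hc, if_pos hc]
        have hgd : (res.set i.toNat x0).getD i.toNat PySem.Dict.empty = x0 := by
          rw [List.getD_eq_getElem?_getD, List.getElem?_set_self']
          rw [List.getElem?_eq_getElem (hc.1 ▸ hc.2)]
          rfl
        rw [hgd]
      · rw [if_neg hc, if_neg hc]
        by_cases hj : j = i.toNat
        · have hge : res.length ≤ j := by
            by_contra hcon
            exact hc ⟨hj, by omega⟩
          rw [List.getElem?_eq_none (l := res.set i.toNat x0) (by simpa using hge),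
            List.getElem?_eq_none hge]
        · rw [List.getElem?_set_ne (fun h => hj h.symm)]

theorem pv_binner_len (i : Int) (data : List (String × List (List String)))
    (res : List (PySem.Dict String (List (PySem.Dict String Int)))) :
    (data.foldl (fun res kv =>
        if kv.2.isEmpty = true then res
        else res.set i.toNat
          ((res.getD i.toNat PySem.Dict.empty).insert kv.1 (kv.2.map (fun tokens => pvCountsAlt tokens i))))
      res).length = res.length := by
  induction data generalizing res with
  | nil => rfl
  | cons kv tl ih =>
    rw [List.foldl_cons]
    by_cases he : kv.2.isEmpty = true
    · rw [if_pos he, ih]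
    · rw [if_neg he, ih, List.length_set]

-- B's order loop, pointwise (over any Nodup list of in-range orders)
theorem pv_bouter (data : List (String × List (List String))) :
    ∀ (is : List Int), is.Nodup → ∀ (res : List (PySem.Dict String (List (PySem.Dict String Int)))),
      (∀ i ∈ is, 0 ≤ i ∧ i.toNat < res.length) → ∀ (j : Nat),
      (is.foldl (fun res L =>
          data.foldl (fun res kv =>
            if kv.2.isEmpty = true then res
            else res.set L.toNat
              ((res.getD L.toNat PySem.Dict.empty).insert kv.1 (kv.2.map (fun tokens => pvCountsAlt tokens L))))
            res) res)[j]?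
      = if (j : Int) ∈ is then
          some (data.foldl (fun d kv =>
              if kv.2.isEmpty = true then d
              else d.insert kv.1 (kv.2.map (fun tokens => pvCountsAlt tokens (j : Int))))
            (res.getD j PySem.Dict.empty))
        else res[j]? := by
  intro is
  induction is with
  | nil => intro _ res _ j; simp
  | cons i tl ih =>
    intro hnd res hb j
    have hnd' := hnd.of_cons
    have hi := hb i (List.mem_cons_self ..)
    rw [List.foldl_cons]
    set res' := data.foldl (fun res kv =>
        if kv.2.isEmpty = true then res
        else res.set i.toNat
          ((res.getD i.toNat PySem.Dict.empty).insert kv.1 (kv.2.map (fun tokens => pvCountsAlt tokens i))))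
      res with hres'
    have hlen' : res'.length = res.length := pv_binner_len i data res
    have hb' : ∀ x ∈ tl, 0 ≤ x ∧ x.toNat < res'.length := by
      intro x hx
      rw [hlen']
      exact hb x (List.mem_cons_of_mem _ hx)
    rw [ih hnd' res' hb' j]
    by_cases hjt : (j : Int) ∈ tl
    · rw [if_pos hjt, if_pos (List.mem_cons_of_mem _ hjt)]
      have hne : j ≠ i.toNat := by
        intro h
        have : i = (j : Int) := by omega
        exact (List.nodup_cons.mp hnd).1 (this ▸ hjt)
      have hgd : res'.getD j PySem.Dict.empty = res.getD j PySem.Dict.empty := by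
        rw [List.getD_eq_getElem?_getD, hres', pv_binner_ptwise i data res j,
          if_neg (fun h => hne h.1), ← List.getD_eq_getElem?_getD]
      rw [hgd]
    · rw [if_neg hjt]
      by_cases hji : (j : Int) = i
      · have hji' : j = i.toNat := by omega
        rw [if_pos (by simp [hji]), hres', pv_binner_ptwise i data res j,
          if_pos ⟨hji', hji' ▸ hi.2⟩]
        rw [hji, hji']
      · have hne : j ≠ i.toNat := by omega
        rw [if_neg (by simp [hji, hjt]), hres', pv_binner_ptwise i data res j,
          if_neg (fun h => hne h.1)]

-- B's per-order dict: inserts at fresh distinct keys append in data order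
theorem pv_insert_group {ν : Type} (f : String × List (List String) → ν) :
    ∀ (data : List (String × List (List String))) (itms : List (String × ν)),
      (itms.map Prod.fst ++ data.map Prod.fst).Nodup →
      (data.foldl (fun d kv => if kv.2.isEmpty = true then d else d.insert kv.1 (f kv))
        (PySem.Dict.mk itms)).items
      = itms ++ (data.filter (fun kv => !kv.2.isEmpty)).map (fun kv => (kv.1, f kv)) := by
  intro data
  induction data with
  | nil => intro itms _; simp
  | cons kv tl ih =>
    intro itms hnd
    rw [List.map_cons] at hnd
    have hnd2 : (itms.map Prod.fst ++ ([kv.1] ++ tl.map Prod.fst)).Nodup := hnd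
    rw [← List.append_assoc] at hnd2
    have hfresh : ∀ p ∈ itms, (p.1 == kv.1) = false := by
      intro p hp
      have hdisj := (List.nodup_append.mp hnd).2.2
      have hm : p.1 ∈ itms.map Prod.fst := List.mem_map_of_mem hp
      have hne : p.1 ≠ kv.1 := hdisj _ hm _ (List.mem_cons_self ..)
      simp [hne]
    rw [List.foldl_cons]
    by_cases he : kv.2.isEmpty = true
    · rw [if_pos he, ih itms ?hnd']
      · rw [List.filter_cons_of_neg (by simp [he])]
      case hnd' =>
        have h1 := List.nodup_append.mp hnd
        have h2 := List.nodup_cons.mp h1.2.1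
        refine List.nodup_append.mpr ⟨h1.1, h2.2, ?_⟩
        intro a ha b hb
        exact h1.2.2 a ha b (List.mem_cons_of_mem _ hb)
    · rw [if_neg he]
      have hcont : (PySem.Dict.mk itms).contains kv.1 = false := by
        rw [PySem.Dict.contains_mk]
        simp only [List.any_eq_false]
        intro p hp; simp [hfresh p hp]
      have hd : (PySem.Dict.mk itms).insert kv.1 (f kv) = PySem.Dict.mk (itms ++ [(kv.1, f kv)]) := by
        apply PySem.Dict.ext
        rw [PySem.Dict.items_insert_of_not_contains _ _ hcont]
      rw [hd, ih _ ?hnd']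
      · rw [List.filter_cons_of_pos (by simp [he])]
        simp
      case hnd' =>
        rw [List.map_append]
        rw [List.append_assoc]
        simpa using hnd2

-- ===== VERDICT (by name: the statement is the Claim_ definition above) =====
theorem get_ngram_counts_spec : Claim_equal_get_ngram_counts := by
  intro data n _ hpre
  unfold Spec_get_ngram_counts
  simp only [get_ngram_counts, get_ngram_counts_alt]
  have hlen0 : ((List.range n.toNat).map (fun _ => (PySem.Dict.empty : PySem.Dict String (List (PySem.Dict String Int))))).length = n.toNat := by simp
  congr 1
  apply List.ext_getElem?
  intro j
  rw [pv_dloop n data _ hlen0 j]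
  have hbnd : ∀ i ∈ PySem.List.pyRange 1 n, 0 ≤ i ∧ i.toNat <
      ((List.range n.toNat).map (fun _ => (PySem.Dict.empty : PySem.Dict String (List (PySem.Dict String Int))))).length := by
    intro i hi
    have hm := PySem.List.mem_pyRange_one.mp hi
    rw [hlen0]
    exact ⟨by omega, by omega⟩
  rw [pv_bouter data (PySem.List.pyRange 1 n) (PySem.List.nodup_pyRange_one 1 n) _ hbnd j]
  by_cases hc : 1 ≤ (j : Int) ∧ (j : Int) < n
  · rw [if_pos hc, if_pos (PySem.List.mem_pyRange_one.mpr hc)]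
    congr 1
    have hgd : ((List.range n.toNat).map (fun _ => (PySem.Dict.empty : PySem.Dict String (List (PySem.Dict String Int))))).getD j PySem.Dict.empty = PySem.Dict.empty := by
      rw [List.getD_eq_getElem?_getD, List.getElem?_map, List.getElem?_range (show j < n.toNat by omega)]
      rfl
    rw [hgd]
    apply PySem.Dict.ext
    have hA := pv_group (fun t => pvNgramCounts t (j : Int)) data [] (by simpa using hpre)
    have hB := pv_insert_group (fun kv => kv.2.map (fun tokens => pvCountsAlt tokens (j : Int)))
      data [] (by simpa using hpre)
    rw [show (PySem.Dict.empty : PySem.Dict String (List (PySem.Dict String Int))) = PySem.Dict.mk [] from rfl]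
    rw [hA, hB, List.nil_append, List.nil_append]
    apply List.map_congr_left
    intro kv _
    rw [show (fun t => pvNgramCounts t (j : Int)) = (fun t => pvCountsAlt t (j : Int)) from
      funext (fun t => pv_counts_eq t (j : Int) hc.1)]
  · rw [if_neg hc, if_neg (fun hm => hc (PySem.List.mem_pyRange_one.mp hm))]
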